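-- pv_equiv track=rewrite | github.com/y00273676/music_manager | lib/types.py | remove_empty_element
-- ===== SOURCE A (Python) =====
-- def remove_empty_element(tlist):
--     if not isinstance(tlist, list):
--         return []
--     index_list = []
--     index = 0
--     for sub in tlist:
--         if not sub:
--             index_list.append(index)
--         index += 1
--     index_list.reverse()
--
--     for sub in index_list:
--         tlist.pop(sub)
--     return tlist
-- ===== SOURCE B (Python) =====
-- def remove_empty_element(tlist):
--     if not isinstance(tlist, list):
--         return []
--     w = 0
--     for r in range(len(tlist)):
--         if tlist[r]:
--             tlist[w] = tlist[r]
--             w += 1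
--     del tlist[w:]
--     return tlist
-- ===== Notes on version B (the rewrite author's own statement) =====
-- stated objective: alternative
-- what changed: Replaced A's two-phase collect-falsy-indices-then-pop-in-reverse (each pop shifts the tail) by a single-pass in-place two-pointer compaction with one final tail truncation.
import Mathlib
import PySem

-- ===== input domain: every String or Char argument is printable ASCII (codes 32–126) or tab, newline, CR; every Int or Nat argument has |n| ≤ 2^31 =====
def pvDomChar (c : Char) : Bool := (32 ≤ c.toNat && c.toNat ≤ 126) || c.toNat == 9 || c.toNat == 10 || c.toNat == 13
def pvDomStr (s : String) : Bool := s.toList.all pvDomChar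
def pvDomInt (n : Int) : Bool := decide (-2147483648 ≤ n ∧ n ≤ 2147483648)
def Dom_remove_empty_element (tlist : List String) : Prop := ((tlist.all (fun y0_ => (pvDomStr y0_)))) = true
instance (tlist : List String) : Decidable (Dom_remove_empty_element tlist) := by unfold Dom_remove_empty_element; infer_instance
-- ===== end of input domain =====

-- B replaces A's collect-indices-then-pop-in-reverse removal of empty strings by a single-pass
-- two-pointer in-place compaction; equivalence is about the returned list's value (both Pythons
-- mutate the argument list in place).


-- ===== PORT A =====
-- the second loop's body: tlist.pop(sub)  (index always in range here, so the none branch is dead)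
def pvPopStep (t : List String) (i : Int) : List String :=
  match PySem.List.pop? t i with
  | some r => r.2
  | none => t

def remove_empty_element (tlist : List String) : List String :=
  -- index_list = []; index = 0; for sub in tlist: if not sub: index_list.append(index); index += 1
  let p := tlist.foldl
    (fun (s : List Int × Int) sub => (if sub = "" then s.1 ++ [s.2] else s.1, s.2 + 1))
    ([], 0)
  -- index_list.reverse(); for sub in index_list: tlist.pop(sub)
  let index_list := p.1.reverse
  index_list.foldl pvPopStep tlist

-- ===== PORT B =====
-- loop body: if tlist[r]: tlist[w] = tlist[r]; w += 1   (state = (tlist, w))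
def pvBStep (s : List String × Int) (r : Int) : List String × Int :=
  if PySem.List.pyGetD s.1 r "" ≠ "" then
    (PySem.List.pySetD s.1 s.2 (PySem.List.pyGetD s.1 r ""), s.2 + 1)
  else s

def remove_empty_element_alt (tlist : List String) : List String :=
  let s := (PySem.List.pyRange 0 (tlist.length : Int) 1).foldl pvBStep (tlist, 0)
  -- del tlist[w:]; return tlist  →  tlist[:w]
  PySem.List.slice s.1 none (some s.2)

-- ===== PRECONDITION & SPEC =====
def Spec_remove_empty_element (tlist : List String) (out : List String) : Prop := out = remove_empty_element_alt tlist
instance (tlist : List String) (out : List String) : Decidable (Spec_remove_empty_element tlist out) := by unfold Spec_remove_empty_element; infer_instance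

-- ===== CLAIM (what is proved, stated in full; the proofs are below) =====
def Claim_equal_remove_empty_element : Prop := ∀ (tlist : List String), Dom_remove_empty_element tlist → Spec_remove_empty_element tlist (remove_empty_element tlist)

-- ===== LEMMAS AND PROOFS =====

-- the common value: the list with empty strings filtered out
def pvF (xs : List String) : List String := xs.filter (fun s => s ≠ "")

-- increasing Nat indices of the empty strings of xs
def pvEmptyIdx : List String → List Nat
  | [] => []
  | x :: xs => (if x = "" then [0] else []) ++ (pvEmptyIdx xs).map (· + 1)

theorem pvLoop1 (xs : List String) (acc : List Int) (k : Int) :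
    xs.foldl (fun (s : List Int × Int) sub => (if sub = "" then s.1 ++ [s.2] else s.1, s.2 + 1)) (acc, k)
      = (acc ++ (pvEmptyIdx xs).map (fun (i : Nat) => k + (i : Int)), k + xs.length) := by
  induction xs generalizing acc k with
  | nil => simp [pvEmptyIdx]
  | cons x xs ih =>
    rw [List.foldl_cons]
    show xs.foldl _ ((if x = "" then acc ++ [k] else acc), k + 1) = _
    rw [ih]
    have hm : (pvEmptyIdx xs).map ((fun i : Nat => k + (i : Int)) ∘ (· + 1))
        = (pvEmptyIdx xs).map (fun i : Nat => (k + 1) + (i : Int)) := by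
      apply List.map_congr_left
      intro i _
      simp only [Function.comp]
      push_cast
      ring
    refine Prod.ext ?_ (by push_cast [List.length_cons]; ring)
    simp only [pvEmptyIdx, List.map_append, List.map_map, hm]
    split_ifs with h <;> simp

theorem pvEmptyIdx_lt (xs : List String) : ∀ i ∈ pvEmptyIdx xs, i < xs.length := by
  induction xs with
  | nil => simp [pvEmptyIdx]
  | cons x xs ih =>
    intro i hi
    simp only [pvEmptyIdx, List.mem_append, List.mem_map] at hi
    rcases hi with h | ⟨j, hj, rfl⟩
    · split_ifs at h <;> simp_all
    · have := ih j hj; simp; omega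

theorem pvEmptyIdx_sorted (xs : List String) : (pvEmptyIdx xs).Pairwise (· < ·) := by
  induction xs with
  | nil => simp [pvEmptyIdx]
  | cons x xs ih =>
    simp only [pvEmptyIdx]
    rw [List.pairwise_append]
    refine ⟨?_, (List.pairwise_map).2 (ih.imp (by omega)), ?_⟩
    · split_ifs <;> simp
    · intro a ha b hb
      split_ifs at ha with hx
      · simp only [List.mem_singleton] at ha
        simp only [List.mem_map] at hb
        obtain ⟨c, _, rfl⟩ := hb
        omega
      · simp at ha

theorem pvEmptyIdx_concat (xs : List String) (a : String) :
    pvEmptyIdx (xs ++ [a]) = pvEmptyIdx xs ++ (if a = "" then [xs.length] else []) := by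
  induction xs with
  | nil => simp only [List.nil_append, pvEmptyIdx]; split_ifs <;> simp
  | cons x xs ih =>
    simp only [List.cons_append, pvEmptyIdx, ih]
    split_ifs <;> simp

-- popping strictly decreasing in-range indices never touches an appended last element
theorem pvPopF_append (is : List Int) (xs : List String) (a : String)
    (hb : ∀ i ∈ is, 0 ≤ i ∧ i < (xs.length : Int)) (hp : is.Pairwise (· > ·)) :
    is.foldl pvPopStep (xs ++ [a]) = is.foldl pvPopStep xs ++ [a] := by
  induction is generalizing xs with
  | nil => simp
  | cons i is ih =>
    obtain ⟨h0, hlt⟩ := hb i (by simp)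
    obtain ⟨n, rfl⟩ : ∃ m : Nat, i = (m : Int) := ⟨i.toNat, by omega⟩
    have hn : n < xs.length := by exact_mod_cast hlt
    have e1 : pvPopStep (xs ++ [a]) ((n : Int)) = xs.eraseIdx n ++ [a] := by
      rw [pvPopStep, PySem.List.pop?_natCast _ _ (by simp [List.length_append]; omega)]
      simp [List.eraseIdx_append_of_lt_length hn]
    have e2 : pvPopStep xs ((n : Int)) = xs.eraseIdx n := by
      rw [pvPopStep, PySem.List.pop?_natCast _ _ hn]
    simp only [List.foldl_cons, e1, e2]
    apply ih
    · intro j hj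
      obtain ⟨hj0, _⟩ := hb j (by simp [hj])
      have hji : j < (n : Int) := (List.pairwise_cons.1 hp).1 j hj
      have hle : (xs.eraseIdx n).length = xs.length - 1 := by
        rw [List.length_eraseIdx_of_lt hn]
      rw [hle]
      exact ⟨hj0, by omega⟩
    · exact (List.pairwise_cons.1 hp).2

theorem pvA_eq (xs : List String) :
    (((pvEmptyIdx xs).map (fun (i : Nat) => (i : Int))).reverse).foldl pvPopStep xs = pvF xs := by
  induction xs using List.reverseRecOn with
  | nil => simp [pvF, pvEmptyIdx]
  | append_singleton xs a ih =>
    rw [pvEmptyIdx_concat]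
    by_cases ha : a = ""
    · subst ha
      rw [if_pos rfl, List.map_append, List.reverse_append]
      have hlast : pvPopStep (xs ++ [""]) ((xs.length : Int)) = xs := by
        have hn : xs.length < (xs ++ [""]).length := by simp
        rw [pvPopStep, PySem.List.pop?_natCast _ _ hn]
        simp [List.eraseIdx_append_of_length_le (le_refl xs.length)]
      simp only [List.map_cons, List.map_nil, List.reverse_cons, List.reverse_nil,
        List.nil_append, List.singleton_append, List.foldl_cons, hlast]
      rw [ih]
      simp [pvF, List.filter_append]
    · rw [if_neg ha, List.append_nil]
      rw [pvPopF_append _ xs a ?_ ?_, ih]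
      · simp [pvF, List.filter_append, ha]
      · intro i hi
        simp only [List.mem_reverse, List.mem_map] at hi
        obtain ⟨j, hj, rfl⟩ := hi
        have := pvEmptyIdx_lt xs j hj
        exact ⟨by positivity, by exact_mod_cast this⟩
      · rw [List.pairwise_reverse]
        refine (List.pairwise_map).2 ((pvEmptyIdx_sorted xs).imp ?_)
        intro a b h
        simpa using h

-- B's invariant: after n steps the state is (filtered prefix ++ untouched suffix, write index)
theorem pvB_inv (xs : List String) (n : Nat) (hn : n ≤ xs.length) :
    (List.range n).foldl (fun s (k : Nat) => pvBStep s ((0 : Int) + (k : Int))) (xs, 0)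
      = (pvF (xs.take n) ++ xs.drop (pvF (xs.take n)).length, ((pvF (xs.take n)).length : Int)) := by
  induction n with
  | zero => simp [pvF]
  | succ n ih =>
    have hn' : n ≤ xs.length := by omega
    have hnx : n < xs.length := by omega
    rw [List.range_succ, List.foldl_append, ih hn']
    set A := pvF (xs.take n) with hA
    have hw : A.length ≤ n := by
      calc A.length ≤ (xs.take n).length := List.length_filter_le _ _
        _ = n := by simp [hn']
    have hread : PySem.List.pyGetD (A ++ xs.drop A.length) ((0 : Int) + (n : Int)) "" = xs[n] := by
      rw [zero_add, PySem.List.pyGetD_natCast]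
      have h1 : n < (A ++ xs.drop A.length).length := by simp; omega
      rw [List.getD_eq_getElem _ _ h1, List.getElem_append_right hw, List.getElem_drop]
      congr 1
      omega
    have htake : xs.take (n + 1) = xs.take n ++ [xs[n]] := by
      rw [List.take_add_one]
      simp [List.getElem?_eq_getElem hnx]
    simp only [List.foldl_cons, List.foldl_nil, pvBStep, hread]
    by_cases he : xs[n] = ""
    · rw [if_neg (by simp [he])]
      have : pvF (xs.take (n + 1)) = A := by
        rw [htake, hA, pvF, pvF, List.filter_append]
        simp [he]
      rw [this]
    · rw [if_pos (by simp [he])]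
      have hFnew : pvF (xs.take (n + 1)) = A ++ [xs[n]] := by
        rw [htake, hA, pvF, pvF, List.filter_append]
        simp [he]
      have hdrop : xs.drop A.length = xs[A.length] :: xs.drop (A.length + 1) := by
        rw [List.drop_eq_getElem_cons (by omega)]
      have hset : PySem.List.pySetD (A ++ xs.drop A.length) ((A.length : Int)) xs[n]
          = (A ++ [xs[n]]) ++ xs.drop (A.length + 1) := by
        rw [PySem.List.pySetD_natCast, hdrop, List.set_append_right _ _ (le_refl A.length)]
        simp only [Nat.sub_self, List.set_cons_zero, List.append_assoc, List.singleton_append]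
      rw [hFnew, hset]
      have hlen1 : (A ++ [xs[n]]).length = A.length + 1 := by simp
      rw [hlen1]
      exact Prod.ext rfl (by push_cast; ring)

theorem pvB_val (xs : List String) : remove_empty_element_alt xs = pvF xs := by
  unfold remove_empty_element_alt
  rw [PySem.List.pyRange_one]
  simp only [Int.sub_zero, Int.toNat_natCast, List.foldl_map]
  rw [pvB_inv xs xs.length (le_refl _)]
  simp only [List.take_length]
  rw [PySem.List.slice_to_natCast]
  exact List.take_left

theorem pvA_val (xs : List String) : remove_empty_element xs = pvF xs := by
  unfold remove_empty_element
  rw [pvLoop1]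
  simp only [List.nil_append, zero_add]
  exact pvA_eq xs

-- ===== VERDICT (by name: the statement is the Claim_ definition above) =====
theorem remove_empty_element_spec : Claim_equal_remove_empty_element := by
  intro tlist _
  unfold Spec_remove_empty_element
  rw [pvA_val, pvB_val]
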